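-- pv_equiv track=rewrite | github.com/Yenike-RaghuRam/HomeAssignment | Coding/Python/Set5/ReverseSubArrayofk.py | reverse_subarray_size_k
-- ===== SOURCE A (Python) =====
-- def reverse_subarray_size_k(arrs, k):
--     for idx in range(0, len(arrs), k):
--         start = idx
--         end = min(idx + k - 1, len(arrs) - 1)
--         while start < end:
--             temp = arrs[start]
--             arrs[start] = arrs[end]
--             arrs[end] = temp
--             start += 1
--             end -= 1
--     return arrs
-- ===== SOURCE B (Python) =====
-- def reverse_subarray_size_k(arrs, k):
--     # mutates arrs in place (same as A): per-block slice assignment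
--     for i in range(0, len(arrs), k):
--         arrs[i:i + k] = arrs[i:i + k][::-1]
--     return arrs
-- ===== Notes on version B (the rewrite author's own statement) =====
-- stated objective: simpler
-- what changed: Replaces the two-pointer swap loop with min-clamped end index by slice-extract, reverse, slice-assign per block.
import Mathlib
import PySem

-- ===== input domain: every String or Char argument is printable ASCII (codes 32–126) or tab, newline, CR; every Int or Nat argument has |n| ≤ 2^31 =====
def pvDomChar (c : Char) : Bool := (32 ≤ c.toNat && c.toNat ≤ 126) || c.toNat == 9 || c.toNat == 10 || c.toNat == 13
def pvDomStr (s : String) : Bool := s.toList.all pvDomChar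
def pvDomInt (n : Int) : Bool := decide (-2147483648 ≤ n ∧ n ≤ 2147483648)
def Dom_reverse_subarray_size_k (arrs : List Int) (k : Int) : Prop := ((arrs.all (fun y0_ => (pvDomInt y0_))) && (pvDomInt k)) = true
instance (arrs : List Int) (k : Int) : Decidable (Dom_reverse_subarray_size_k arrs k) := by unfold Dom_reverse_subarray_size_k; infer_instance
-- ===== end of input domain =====

-- B replaces A's two-pointer swap loop (with min-clamped end index) by per-block
-- slice-extract / reverse / slice-assign; objective: simpler. Both A and B mutate
-- the argument list in place in the same way; the equivalence proved is about the
-- returned value.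

-- ===== PORT A =====
-- inner 'while start < end' swap loop; indices are always in range when the loop
-- body runs (0 ≤ start < end ≤ len-1), so pyGetD/pySetD are exact here
def pvSwapLoop (a : List Int) (s e : Int) : List Int :=
  if h : s < e then
    let temp := PySem.List.pyGetD a s 0
    let a1 := PySem.List.pySetD a s (PySem.List.pyGetD a e 0)
    let a2 := PySem.List.pySetD a1 e temp
    pvSwapLoop a2 (s + 1) (e - 1)
  else a
termination_by (e - s).toNat
decreasing_by omega

def reverse_subarray_size_k (arrs : List Int) (k : Int) : List Int :=
  (PySem.List.pyRange 0 arrs.length k).foldl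
    (fun a idx =>
      let start := idx
      let «end» := min (idx + k - 1) ((a.length : Int) - 1)
      pvSwapLoop a start «end») arrs

-- ===== PORT B =====
-- one body of B's loop: arrs[i:i+k] = arrs[i:i+k][::-1]; whenever the loop runs,
-- i ≥ 0 and i+k ≥ 1, so Python's slice assignment is exactly take/new-slice/drop
def pvBlockRev (k : Int) (a : List Int) (i : Int) : List Int :=
  a.take i.toNat ++ (PySem.List.slice a (some i) (some (i + k))).reverse ++ a.drop (i + k).toNat

def reverse_subarray_size_k_alt (arrs : List Int) (k : Int) : List Int :=
  (PySem.List.pyRange 0 arrs.length k).foldl (pvBlockRev k) arrs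

-- ===== PRECONDITION & SPEC =====
-- Pre_ excludes only k = 0, where Python's range(0, len, 0) raises ValueError (in both A and B)
def Pre_reverse_subarray_size_k (arrs : List Int) (k : Int) : Prop := k ≠ 0
instance (arrs : List Int) (k : Int) : Decidable (Pre_reverse_subarray_size_k arrs k) := by unfold Pre_reverse_subarray_size_k; infer_instance
def pvWitness_reverse_subarray_size_k : List Int × Int := ([1, 2, 3, 4, 5], 2)

def Spec_reverse_subarray_size_k (arrs : List Int) (k : Int) (out : List Int) : Prop := out = reverse_subarray_size_k_alt arrs k
instance (arrs : List Int) (k : Int) (out : List Int) : Decidable (Spec_reverse_subarray_size_k arrs k out) := by unfold Spec_reverse_subarray_size_k; infer_instance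

-- ===== CLAIM (what is proved, stated in full; the proofs are below) =====
def Claim_equal_reverse_subarray_size_k : Prop := ∀ (arrs : List Int) (k : Int), Dom_reverse_subarray_size_k arrs k → Pre_reverse_subarray_size_k arrs k → Spec_reverse_subarray_size_k arrs k (reverse_subarray_size_k arrs k)

-- ===== LEMMAS AND PROOFS =====

lemma pvSwapLoop_small (m p q : List Int) (s e : Int) (hm : m.length ≤ 1)
    (he : ¬ s < e) : pvSwapLoop (p ++ m ++ q) s e = p ++ m.reverse ++ q := by
  rw [pvSwapLoop, dif_neg he]
  match m, hm with
  | [], _ => simp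
  | [x], _ => simp

lemma pvSwapLoop_seg : ∀ (n : Nat) (m p q : List Int) (s e : Int), m.length ≤ n →
    s = (p.length : Int) → e = (p.length : Int) + m.length - 1 →
    pvSwapLoop (p ++ m ++ q) s e = p ++ m.reverse ++ q := by
  intro n
  induction n with
  | zero =>
    intro m p q s e hm hs he
    have hm0 : m = [] := List.eq_nil_of_length_eq_zero (by omega)
    exact pvSwapLoop_small m p q s e (by omega) (by subst hm0; simp at he; omega)
  | succ n ih =>
    intro m p q s e hm hs he
    match m with
    | [] => exact pvSwapLoop_small [] p q s e (by simp) (by simp at he; omega)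
    | [x] => exact pvSwapLoop_small [x] p q s e (by simp) (by simp at he; omega)
    | x :: t =>
      rcases t.eq_nil_or_concat with h1 | ⟨u, y, h1⟩
      · subst h1; exact pvSwapLoop_small [x] p q s e (by simp) (by simp at he; omega)
      · subst h1
        simp only [List.concat_eq_append] at *
        -- m = x :: u ++ [y]
        have hlm : (x :: (u ++ [y])).length = u.length + 2 := by simp
        have hslt : s < e := by rw [hs, he, hlm]; push_cast; omega
        rw [pvSwapLoop, dif_pos hslt]
        -- canonical form of the list
        have hA : p ++ (x :: (u ++ [y])) ++ q = p ++ x :: (u ++ y :: q) := by simp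
        rw [hA]
        set A := p ++ x :: (u ++ y :: q) with hAdef
        have hlenA : A.length = p.length + u.length + 2 + q.length := by simp [hAdef]; omega
        have hsN : s.toNat = p.length := by omega
        have heN : e.toNat = p.length + u.length + 1 := by rw [he, hlm]; omega
        have hgs : PySem.List.pyGetD A s 0 = x := by
          rw [PySem.List.pyGetD_eq_getElem A 0 (by omega) (by rw [hlenA]; omega),
            List.getElem_eq_iff, hsN, hAdef]
          rw [List.getElem?_append_right (le_refl p.length)]
          simp
        have hge : PySem.List.pyGetD A e 0 = y := by
          rw [PySem.List.pyGetD_eq_getElem A 0 (by omega) (by rw [hlenA]; rw [he, hlm]; push_cast; omega),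
            List.getElem_eq_iff, heN, hAdef]
          rw [List.getElem?_append_right (by omega : p.length ≤ p.length + u.length + 1)]
          simp only [show p.length + u.length + 1 - p.length = u.length + 1 by omega,
            List.getElem?_cons_succ]
          rw [List.getElem?_append_right (le_refl u.length)]
          simp
        have hset : PySem.List.pySetD (PySem.List.pySetD A s y) e x
            = (p ++ [y]) ++ u ++ (x :: q) := by
          rw [PySem.List.pySetD_of_nonneg A y (by omega : (0:Int) ≤ s)]
          rw [PySem.List.pySetD_of_nonneg (A.set s.toNat y) x
            (by rw [he, hlm]; push_cast; omega : (0:Int) ≤ e)]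
          rw [hsN, heN, hAdef]
          rw [List.set_append, if_neg (by omega)]
          simp only [show p.length - p.length = 0 by omega, List.set_cons_zero]
          rw [List.set_append, if_neg (by omega)]
          simp only [show p.length + u.length + 1 - p.length = u.length + 1 by omega,
            List.set_cons_succ]
          rw [List.set_append, if_neg (by omega)]
          simp only [show u.length - u.length = 0 by omega, List.set_cons_zero]
          simp
        rw [hgs, hge]
        show pvSwapLoop (PySem.List.pySetD (PySem.List.pySetD A s y) e x) (s + 1) (e - 1)
          = p ++ (x :: (u ++ [y])).reverse ++ q
        rw [hset]
        have := ih u (p ++ [y]) (x :: q) (s + 1) (e - 1) (by simp at hm ⊢; omega)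
          (by rw [hs]; simp) (by rw [he, hlm]; push_cast; simp; omega)
        rw [this]
        simp


-- one iteration of A's outer loop equals one iteration of B's
lemma pvStep_eq (a : List Int) (idx k : Int) (hk : 1 ≤ k) (h0 : 0 ≤ idx)
    (hlt : idx < (a.length : Int)) :
    pvSwapLoop a idx (min (idx + k - 1) ((a.length : Int) - 1)) = pvBlockRev k a idx := by
  have hck : (0:Int) ≤ idx + k := by omega
  set s : Nat := idx.toNat with hsdef
  set c : Nat := (idx + k).toNat with hcdef
  have hsc : s < c := by omega
  have hslen : s < a.length := by omega
  set p : List Int := a.take s with hp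
  set m : List Int := (a.drop s).take (c - s) with hmdef
  set q : List Int := a.drop c with hq
  have hlp : p.length = s := by simp [hp]; omega
  have hlm : m.length = min (c - s) (a.length - s) := by simp [hmdef]
  have hA : p ++ m ++ q = a := by
    have hq' : q = (a.drop s).drop (c - s) := by
      rw [hq, List.drop_drop]; congr 1; omega
    rw [List.append_assoc, hmdef, hq', List.take_append_drop, hp, List.take_append_drop]
  have hseg := pvSwapLoop_seg m.length m p q idx (min (idx + k - 1) ((a.length : Int) - 1))
    (le_refl _) (by rw [hlp]; omega) (by rw [hlp, hlm]; push_cast; omega)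
  rw [hA] at hseg
  rw [hseg]
  unfold pvBlockRev
  rw [PySem.List.slice_toNat a h0 hck]

lemma pvBlockRev_length (a : List Int) (idx k : Int) (hk : 1 ≤ k) (h0 : 0 ≤ idx)
    (hlt : idx < (a.length : Int)) : (pvBlockRev k a idx).length = a.length := by
  unfold pvBlockRev
  rw [PySem.List.slice_toNat a h0 (by omega)]
  simp
  omega

lemma pvFold_eq (k : Int) (hk : 1 ≤ k) (n : Nat) : ∀ (idxs a : List Int), a.length = n →
    (∀ x ∈ idxs, 0 ≤ x ∧ x < (n : Int)) →
    idxs.foldl (fun a idx =>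
      let start := idx
      let «end» := min (idx + k - 1) ((a.length : Int) - 1)
      pvSwapLoop a start «end») a = idxs.foldl (pvBlockRev k) a := by
  intro idxs
  induction idxs with
  | nil => intro a _ _; rfl
  | cons i rest ih =>
    intro a hlen hmem
    have hi := hmem i (by simp)
    have hstep : pvSwapLoop a i (min (i + k - 1) ((a.length : Int) - 1)) = pvBlockRev k a i :=
      pvStep_eq a i k hk hi.1 (by omega)
    simp only [List.foldl_cons, hstep]
    exact ih (pvBlockRev k a i)
      (by rw [pvBlockRev_length a i k hk hi.1 (by omega)]; exact hlen)
      (fun x hx => hmem x (by simp [hx]))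

-- ===== VERDICT (by name: the statement is the Claim_ definition above) =====
theorem reverse_subarray_size_k_spec : Claim_equal_reverse_subarray_size_k := by
  intro arrs k _ hpre
  unfold Spec_reverse_subarray_size_k reverse_subarray_size_k reverse_subarray_size_k_alt
  rcases lt_or_gt_of_ne hpre with hneg | hpos
  · rw [show PySem.List.pyRange 0 (arrs.length : Int) k = [] by
      simp [PySem.List.pyRange, show ¬ (0:Int) < k by omega, show ¬ (arrs.length : Int) < 0 by simp]]
    rfl
  · exact pvFold_eq k (by omega) arrs.length _ arrs rfl
      (fun x hx => by
        have := (PySem.List.mem_pyRange_iff_of_pos hpos x).mp hx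
        exact ⟨this.1, this.2.1⟩)
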